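-- pv_equiv track=rewrite | github.com/shemshallah/oagi-open-source | oagi_v20_1_self_mod.py | create_tangled_hierarchy
-- ===== SOURCE A (Python) =====
-- from typing import Optional, Dict, List, Tuple, Any, Callable, Set
--
-- def create_tangled_hierarchy(base_pattern: List[Any], levels: int = 3) -> List[Any]:
--     hierarchy = [base_pattern]
--
--     for level in range(levels):
--         new_level = [f"level_{level}_views"] + hierarchy[-1] + [f"from_above"]
--
--         if level > 0:
--             new_level.append(f"while_also_being_viewed_by")
--             new_level.extend(hierarchy[0][:3])
--
--         hierarchy.append(new_level)
--
--     tangled = ["TANGLED_HIERARCHY"]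
--     for level in hierarchy:
--         tangled.extend(level)
--
--     return tangled
-- ===== SOURCE B (Python) =====
-- def create_tangled_hierarchy(base_pattern, levels=3):
--     # Closed form: emit level k directly from k (headers counted down, base, one
--     # "from_above", then k copies of the repeated cross-view block); no level is
--     # ever stored or carried between iterations.
--     base = list(base_pattern)
--     extra = ["from_above", "while_also_being_viewed_by"] + base[:3]
--     out = ["TANGLED_HIERARCHY"] + base
--     for k in range(levels):
--         out += [f"level_{j}_views" for j in range(k, -1, -1)]
--         out += base
--         out += ["from_above"]
--         out += extra * k
--     return out
-- ===== Notes on version B (the rewrite author's own statement) =====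
-- stated objective: alternative
-- what changed: B derives each level from a closed form indexed by k (count-down headers, base, one 'from_above', then k copies of the constant cross-view block) and emits it straight into the flat output, instead of A's recursive wrap-the-previous-level construction over a stored list-of-lists followed by a separate flatten pass.
import Mathlib
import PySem

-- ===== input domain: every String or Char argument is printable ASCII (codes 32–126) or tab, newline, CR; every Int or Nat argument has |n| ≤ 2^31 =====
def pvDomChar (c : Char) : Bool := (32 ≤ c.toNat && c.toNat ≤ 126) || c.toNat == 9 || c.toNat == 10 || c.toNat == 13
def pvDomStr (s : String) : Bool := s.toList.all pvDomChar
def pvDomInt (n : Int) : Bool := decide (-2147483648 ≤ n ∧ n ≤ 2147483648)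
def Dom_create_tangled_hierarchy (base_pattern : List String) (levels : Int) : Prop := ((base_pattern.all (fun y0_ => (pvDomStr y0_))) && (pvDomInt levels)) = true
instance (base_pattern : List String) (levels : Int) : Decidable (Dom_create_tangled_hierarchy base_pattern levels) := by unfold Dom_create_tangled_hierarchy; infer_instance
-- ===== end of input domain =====

-- B replaces A's recursive wrap-the-previous-level construction (and its separate flatten
-- pass) by a closed form that emits each level directly from its index k; objective: alternative.

-- ===== PORT A =====
-- the body of A's first for-loop
def pvStepA (h : List (List String)) (level : Int) : List (List String) :=
  let new_level := ["level_" ++ PySem.Int.toStr level ++ "_views"]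
    ++ PySem.List.pyGetD h (-1) [] ++ ["from_above"]
  let new_level := if level > 0 then
      new_level ++ ["while_also_being_viewed_by"]
        ++ PySem.List.slice (PySem.List.pyGetD h 0 []) none (some 3)
    else new_level
  h ++ [new_level]

def create_tangled_hierarchy (base_pattern : List String) (levels : Int) : List String :=
  let hierarchy := (PySem.List.pyRange 0 levels 1).foldl pvStepA [base_pattern]
  hierarchy.foldl (fun tangled level => tangled ++ level) ["TANGLED_HIERARCHY"]

-- ===== PORT B =====
-- B's constant repeated block: ["from_above", "while_also_being_viewed_by"] + base[:3]
def pvExtra (base : List String) : List String :=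
  ["from_above", "while_also_being_viewed_by"] ++ PySem.List.slice base none (some 3)

-- everything B's loop body appends for index k (list * k with k < 0 is empty, hence toNat)
def pvChunk (base : List String) (k : Int) : List String :=
  (PySem.List.pyRange k (-1) (-1)).map (fun j => "level_" ++ PySem.Int.toStr j ++ "_views")
    ++ base ++ ["from_above"] ++ (List.replicate k.toNat (pvExtra base)).flatten

def create_tangled_hierarchy_alt (base_pattern : List String) (levels : Int) : List String :=
  (PySem.List.pyRange 0 levels 1).foldl (fun out k => out ++ pvChunk base_pattern k)
    (["TANGLED_HIERARCHY"] ++ base_pattern)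

-- ===== PRECONDITION & SPEC =====
def Spec_create_tangled_hierarchy (base_pattern : List String) (levels : Int) (out : List String) : Prop := out = create_tangled_hierarchy_alt base_pattern levels
instance (base_pattern : List String) (levels : Int) (out : List String) : Decidable (Spec_create_tangled_hierarchy base_pattern levels out) := by unfold Spec_create_tangled_hierarchy; infer_instance

-- ===== CLAIM (what is proved, stated in full; the proofs are below) =====
def Claim_equal_create_tangled_hierarchy : Prop := ∀ (base_pattern : List String) (levels : Int), Dom_create_tangled_hierarchy base_pattern levels → Spec_create_tangled_hierarchy base_pattern levels (create_tangled_hierarchy base_pattern levels)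

-- ===== LEMMAS AND PROOFS =====

-- the closed-form levels 0..n-1
def pvLevels (bp : List String) (n : Nat) : List (List String) :=
  (List.range n).map (fun k => pvChunk bp (k : Int))

lemma pvChunk_zero (bp : List String) :
    pvChunk bp 0 = "level_0_views" :: (bp ++ ["from_above"]) := by
  have h : PySem.List.pyRange 0 (-1) (-1) = [0] := by decide
  simp [pvChunk, h]
  decide

lemma pvChunk_succ (bp : List String) (n : Nat) :
    pvChunk bp ((n : Int) + 1)
      = ("level_" ++ PySem.Int.toStr ((n : Int) + 1) ++ "_views")
          :: (pvChunk bp (n : Int) ++ pvExtra bp) := by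
  unfold pvChunk
  rw [PySem.List.pyRange_neg_one_cons (by omega)]
  have ht : ((n : Int) + 1).toNat = n + 1 := by omega
  have ht' : ((n : Int)).toNat = n := by omega
  rw [ht, ht', List.replicate_succ', List.flatten_append]
  simp [List.append_assoc]

lemma pvLevels_succ (bp : List String) (n : Nat) :
    pvLevels bp (n + 1) = pvLevels bp n ++ [pvChunk bp (n : Int)] := by
  simp [pvLevels, List.range_succ]

lemma pv_stepA_zero (bp : List String) :
    pvStepA [bp] 0 = bp :: pvLevels bp 1 := by
  simp only [pvStepA]
  have hb : PySem.List.pyGetD ([] ++ [bp]) (-1) ([] : List String) = bp :=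
    PySem.List.pyGetD_neg_one_append_singleton [] bp []
  simp only [List.nil_append] at hb
  simp [hb, pvLevels, pvChunk_zero]
  decide

lemma pv_stepA_succ (bp : List String) (m : Nat) :
    pvStepA (bp :: pvLevels bp (m + 1)) ((m : Int) + 1) = bp :: pvLevels bp (m + 2) := by
  have e1 : bp :: pvLevels bp (m + 1) = (bp :: pvLevels bp m) ++ [pvChunk bp (m : Int)] := by
    simp [pvLevels_succ]
  have hlast : PySem.List.pyGetD (bp :: pvLevels bp (m + 1)) (-1) ([] : List String)
      = pvChunk bp (m : Int) := by
    rw [e1]; exact PySem.List.pyGetD_neg_one_append_singleton _ _ _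
  simp only [pvStepA]
  rw [if_pos (by omega), hlast, PySem.List.pyGetD_zero_cons]
  rw [show m + 2 = (m + 1) + 1 from rfl, pvLevels_succ bp (m + 1),
    show ((m + 1 : Nat) : Int) = (m : Int) + 1 by push_cast; ring, pvChunk_succ]
  simp [pvExtra, List.append_assoc]

lemma pv_flatten_map_singleton (c : Nat → List String) (l : List Nat) :
    (l.map (fun x => [c x])).flatten.flatten = (l.map c).flatten := by
  induction l with
  | nil => rfl
  | cons x xs ih => simp [ih]

-- A's hierarchy after n iterations: base_pattern followed by the closed-form levels 0..n-1
lemma pv_hierA (bp : List String) :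
    ∀ n : Nat, (PySem.List.pyRange 0 (n : Int) 1).foldl pvStepA [bp] = bp :: pvLevels bp n := by
  intro n
  induction n with
  | zero => simp [PySem.List.pyRange_one_eq_nil, pvLevels]
  | succ n ih =>
    have hr : PySem.List.pyRange 0 ((n : Int) + 1) 1
        = PySem.List.pyRange 0 (n : Int) 1 ++ [(n : Int)] :=
      PySem.List.pyRange_one_succ_right (by omega)
    rw [show ((n + 1 : Nat) : Int) = (n : Int) + 1 by push_cast; ring, hr,
        List.foldl_append, ih]
    cases n with
    | zero => simpa using pv_stepA_zero bp
    | succ m =>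
      simp only [List.foldl_cons, List.foldl_nil]
      rw [show ((m + 1 : Nat) : Int) = (m : Int) + 1 by push_cast; ring]
      exact pv_stepA_succ bp m

-- ===== VERDICT (by name: the statement is the Claim_ definition above) =====
theorem create_tangled_hierarchy_spec : Claim_equal_create_tangled_hierarchy := by
  intro bp levels _
  show create_tangled_hierarchy bp levels = create_tangled_hierarchy_alt bp levels
  unfold create_tangled_hierarchy create_tangled_hierarchy_alt
  rcases le_or_gt levels 0 with h | h
  · rw [PySem.List.pyRange_one_eq_nil h]
    simp
  · have hn : levels = ((levels.toNat : Nat) : Int) := by omega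
    rw [hn, pv_hierA bp levels.toNat,
      PySem.List.foldl_append_eq_flatMap (g := fun l => l),
      PySem.List.foldl_append_eq_flatMap (g := pvChunk bp),
      PySem.List.pyRange_zero_nat]
    simp [pvLevels, List.flatMap_def, List.map_map, Function.comp_def, pv_flatten_map_singleton]
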